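-- pv_equiv track=rewrite | github.com/stevenyoungko/padax-hw-week2 | issue5.py | maxZeros
-- ===== SOURCE A (Python) =====
-- def maxZeros(nums):
-- 	nums.insert(0, 1)
-- 	nums.append(1)
-- 	oneindex_lst = []
-- 	for i in range(len(nums)):
-- 		if nums[i] == 1:
-- 			oneindex_lst.append(i)
-- 	count = 0
-- 	for i in range(len(oneindex_lst)-1):
-- 		temp = oneindex_lst[i+1] - oneindex_lst[i] - 1
-- 		if temp > count:
-- 			count = temp
-- 	return count
-- ===== SOURCE B (Python) =====
-- def maxZeros(nums):
--     nums.insert(0, 1)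
--     nums.append(1)
--     count = 0
--     run = 0
--     for x in nums:
--         if x == 1:
--             count = max(count, run)
--             run = 0
--         else:
--             run += 1
--     return count
-- ===== Notes on version B (the rewrite author's own statement) =====
-- stated objective: simpler
-- what changed: Replaces A's materialized list of one-indices plus a second index-difference pass with a single pass keeping a running gap counter and a running maximum (same insert/append mutation of nums is performed).
import Mathlib
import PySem

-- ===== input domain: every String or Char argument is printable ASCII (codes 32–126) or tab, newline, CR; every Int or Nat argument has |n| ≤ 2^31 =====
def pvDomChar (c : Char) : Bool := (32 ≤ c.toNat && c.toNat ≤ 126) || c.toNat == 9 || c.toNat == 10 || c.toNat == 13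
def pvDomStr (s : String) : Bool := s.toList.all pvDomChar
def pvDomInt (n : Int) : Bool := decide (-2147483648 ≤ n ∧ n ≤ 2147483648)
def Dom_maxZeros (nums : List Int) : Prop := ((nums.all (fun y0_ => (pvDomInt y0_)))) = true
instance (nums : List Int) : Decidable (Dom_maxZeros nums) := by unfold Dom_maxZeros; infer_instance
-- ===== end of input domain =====

-- B replaces A's one-index list + gap-difference pass by a single running-counter pass (simpler);
-- both Pythons mutate nums identically (insert(0,1)/append(1)); the theorem is about the return value.

-- ===== PORT A =====
def maxZeros (nums : List Int) : Int :=
  let ms := PySem.List.insert nums 0 (1 : Int) ++ [(1 : Int)]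
  let oneindex :=
    (PySem.List.pyRange 0 (PySem.List.len ms) 1).foldl
      (fun acc i => if PySem.List.pyGetD ms i 0 == 1 then acc ++ [i] else acc) ([] : List Int)
  (PySem.List.pyRange 0 (PySem.List.len oneindex - 1) 1).foldl
    (fun count i =>
      let temp := PySem.List.pyGetD oneindex (i + 1) 0 - PySem.List.pyGetD oneindex i 0 - 1
      if temp > count then temp else count) 0

-- ===== PORT B =====
def maxZeros_alt (nums : List Int) : Int :=
  let ms := (1 : Int) :: (nums ++ [(1 : Int)])
  (ms.foldl (fun (cr : Int × Int) x =>
      if x == 1 then (max cr.1 cr.2, 0) else (cr.1, cr.2 + 1)) ((0 : Int), (0 : Int))).1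

-- ===== PRECONDITION & SPEC =====
def Spec_maxZeros (nums : List Int) (out : Int) : Prop := out = maxZeros_alt nums
instance (nums : List Int) (out : Int) : Decidable (Spec_maxZeros nums out) := by unfold Spec_maxZeros; infer_instance

-- ===== CLAIM (what is proved, stated in full; the proofs are below) =====
def Claim_equal_maxZeros : Prop := ∀ (nums : List Int), Dom_maxZeros nums → Spec_maxZeros nums (maxZeros nums)

-- ===== LEMMAS AND PROOFS =====

-- indices (as Int, starting from s) of the elements equal to 1
def pvOnes : List Int → Int → List Int
  | [], _ => []
  | x :: t, s => if x == 1 then s :: pvOnes t (s + 1) else pvOnes t (s + 1)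

-- A's second loop, structurally: running max of gaps between adjacent entries
def pvGm : List Int → Int → Int
  | a :: b :: t, c => pvGm (b :: t) (if b - a - 1 > c then b - a - 1 else c)
  | _, c => c

-- B's loop body
def pvStep (cr : Int × Int) (x : Int) : Int × Int :=
  if x == 1 then (max cr.1 cr.2, 0) else (cr.1, cr.2 + 1)

lemma pvIteMax (r c : Int) : (if r > c then r else c) = max c r := by
  rcases le_or_gt r c with h | h
  · simp [max_eq_left h, not_lt.mpr h]
  · simp [max_eq_right (le_of_lt h), h]

lemma pvR1 (ms : List Int) : ∀ (s : Int) (acc : List Int),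
    (List.range ms.length).foldl
      (fun acc k => if ms.getD k 0 == 1 then acc ++ [s + (k : Int)] else acc) acc
      = acc ++ pvOnes ms s := by
  induction ms with
  | nil => intro s acc; simp [pvOnes]
  | cons x t ih =>
    intro s acc
    rw [List.length_cons, List.range_succ_eq_map, List.foldl_cons, List.foldl_map]
    have hfun : (fun (a : List Int) (k : Nat) =>
          if (x :: t).getD k.succ 0 == 1 then a ++ [s + (k.succ : Int)] else a)
        = (fun (a : List Int) (k : Nat) =>
          if t.getD k 0 == 1 then a ++ [(s + 1) + (k : Int)] else a) := by
      funext a k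
      have hc : s + (k.succ : Int) = (s + 1) + (k : Int) := by push_cast; ring
      rw [List.getD_cons_succ, hc]
    rw [hfun, ih (s + 1)]
    simp only [List.getD_cons_zero, Nat.cast_zero, add_zero, pvOnes]
    by_cases hx : x == 1 <;> simp [hx]

lemma pvR2 (l : List Int) : ∀ (c : Int),
    (List.range (l.length - 1)).foldl
      (fun c k => if l.getD (k + 1) 0 - l.getD k 0 - 1 > c
                  then l.getD (k + 1) 0 - l.getD k 0 - 1 else c) c
      = pvGm l c := by
  induction l with
  | nil => intro c; simp [pvGm]
  | cons a t ih =>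
    intro c
    cases t with
    | nil => simp [pvGm]
    | cons b t' =>
      have hlen : (a :: b :: t').length - 1 = t'.length + 1 := by simp
      rw [hlen, List.range_succ_eq_map, List.foldl_cons, List.foldl_map]
      have hfun : (fun (c : Int) (k : Nat) =>
            if (a :: b :: t').getD (k.succ + 1) 0 - (a :: b :: t').getD k.succ 0 - 1 > c
            then (a :: b :: t').getD (k.succ + 1) 0 - (a :: b :: t').getD k.succ 0 - 1 else c)
          = (fun (c : Int) (k : Nat) =>
            if (b :: t').getD (k + 1) 0 - (b :: t').getD k 0 - 1 > c
            then (b :: t').getD (k + 1) 0 - (b :: t').getD k 0 - 1 else c) := by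
        funext c k
        simp [Nat.succ_eq_add_one]
      rw [hfun]
      have := ih (if (a :: b :: t').getD (0 + 1) 0 - (a :: b :: t').getD 0 0 - 1 > c
                  then (a :: b :: t').getD (0 + 1) 0 - (a :: b :: t').getD 0 0 - 1 else c)
      simp only [List.length_cons, Nat.add_sub_cancel] at this ⊢
      rw [this]
      simp [pvGm]

lemma pvOnes_cons_one (t : List Int) (s : Int) : pvOnes (1 :: t) s = s :: pvOnes t (s + 1) := by
  simp [pvOnes]

lemma pvOnes_cons_ne (t : List Int) (s x : Int) (h : (x == 1) = false) :
    pvOnes (x :: t) s = pvOnes t (s + 1) := by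
  simp [pvOnes, h]

lemma pvGm_cons₂ (a b : Int) (t : List Int) (c : Int) :
    pvGm (a :: b :: t) c = pvGm (b :: t) (if b - a - 1 > c then b - a - 1 else c) := rfl

lemma pvL (t : List Int) : ∀ (p r c : Int),
    pvGm (p :: pvOnes t (p + r + 1)) c = (t.foldl pvStep (c, r)).1 := by
  induction t with
  | nil => intro p r c; simp [pvOnes, pvGm]
  | cons x t ih =>
    intro p r c
    by_cases hx : x == 1
    · have hx' : x = 1 := by simpa using hx
      subst hx'
      rw [pvOnes_cons_one, pvGm_cons₂]
      rw [show p + r + 1 - p - 1 = r from by ring]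
      rw [show p + r + 1 + 1 = (p + r + 1) + 0 + 1 from by ring]
      rw [ih (p + r + 1) 0 (if r > c then r else c), pvIteMax]
      rw [List.foldl_cons]
      simp [pvStep]
    · simp only [Bool.not_eq_true] at hx
      rw [pvOnes_cons_ne t (p + r + 1) x hx]
      rw [show p + r + 1 + 1 = p + (r + 1) + 1 from by ring]
      rw [ih p (r + 1) c, List.foldl_cons]
      simp [pvStep, hx]

-- the first loop of A computes pvOnes ms 0
lemma pvLoop1 (ms : List Int) :
    (PySem.List.pyRange 0 (PySem.List.len ms) 1).foldl
      (fun acc i => if PySem.List.pyGetD ms i 0 == 1 then acc ++ [i] else acc) ([] : List Int)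
      = pvOnes ms 0 := by
  rw [show PySem.List.len ms = ((ms.length : Nat) : Int) from by simp [PySem.List.len_eq]]
  rw [PySem.List.pyRange_zero_natCast, List.foldl_map]
  have hfun : (fun (acc : List Int) (k : Nat) =>
        if PySem.List.pyGetD ms (k : Int) 0 == 1 then acc ++ [((k : Nat) : Int)] else acc)
      = (fun (acc : List Int) (k : Nat) =>
        if ms.getD k 0 == 1 then acc ++ [(0 : Int) + (k : Int)] else acc) := by
    funext acc k
    rw [PySem.List.pyGetD_natCast, zero_add]
  rw [hfun, pvR1 ms 0 []]
  simp

-- the second loop of A computes pvGm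
lemma pvLoop2 (l : List Int) :
    (PySem.List.pyRange 0 (PySem.List.len l - 1) 1).foldl
      (fun count i =>
        let temp := PySem.List.pyGetD l (i + 1) 0 - PySem.List.pyGetD l i 0 - 1
        if temp > count then temp else count) 0
      = pvGm l 0 := by
  rw [PySem.List.pyRange_one, List.foldl_map]
  have hdrop : (PySem.List.len l - 1 - 0).toNat = l.length - 1 := by
    simp only [PySem.List.len_eq, sub_zero]; omega
  rw [hdrop]
  have hfun : (fun (count : Int) (k : Nat) =>
        let temp := PySem.List.pyGetD l ((0 : Int) + (k : Int) + 1) 0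
                    - PySem.List.pyGetD l ((0 : Int) + (k : Int)) 0 - 1
        if temp > count then temp else count)
      = (fun (count : Int) (k : Nat) =>
        if l.getD (k + 1) 0 - l.getD k 0 - 1 > count
        then l.getD (k + 1) 0 - l.getD k 0 - 1 else count) := by
    funext count k
    simp only [zero_add]
    rw [show ((k : Int) + 1) = ((k + 1 : Nat) : Int) from by push_cast; ring]
    simp only [PySem.List.pyGetD_natCast]
  rw [hfun, pvR2 l 0]

-- ===== VERDICT (by name: the statement is the Claim_ definition above) =====
theorem maxZeros_spec : Claim_equal_maxZeros := by
  intro nums _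
  unfold Spec_maxZeros maxZeros maxZeros_alt
  rw [PySem.List.insert_zero]
  dsimp only
  rw [show ((1 : Int) :: nums) ++ [(1 : Int)] = (1 : Int) :: (nums ++ [(1 : Int)]) from rfl]
  rw [pvLoop1, pvLoop2]
  rw [show pvOnes ((1 : Int) :: (nums ++ [(1 : Int)])) 0
        = 0 :: pvOnes (nums ++ [(1 : Int)]) ((0 : Int) + 0 + 1) from by
      rw [pvOnes_cons_one]; norm_num]
  rw [pvL (nums ++ [(1 : Int)]) 0 0 0]
  have hlam : (fun (cr : Int × Int) (x : Int) =>
      if x == 1 then (max cr.1 cr.2, 0) else (cr.1, cr.2 + 1)) = pvStep := rfl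
  rw [hlam, List.foldl_cons,
    show pvStep ((0 : Int), (0 : Int)) 1 = ((0 : Int), (0 : Int)) from by decide]
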